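-- pv_equiv track=rewrite | github.com/aimperial2/codepath-tip101 | TIP101/Unit-3/practice-6.py | longest_uniform_substring
-- ===== SOURCE A (Python) =====
-- def longest_uniform_substring(s):
-- # if string is None or empty, return 0
--     if s is None or len(s) == 0:
--         return 0
-- # initialize variables
--     max_length = 1
--     current_length = 1
--
--     # loop through the string
--     for i in range(1, len(s)):
--         if s[i] == s[i - 1]:
--             current_length += 1
--         else:
--             max_length = max(max_length, current_length)
--             current_length = 1
--
--     max_length = max(max_length, current_length)
--     return max_length
-- ===== SOURCE B (Python) =====
-- def longest_uniform_substring(s):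
--     # Brute force: for every starting position, count the run of equal
--     # characters beginning there; answer is the best such run.
--     if s is None or len(s) == 0:
--         return 0
--     best = 0
--     for i in range(len(s)):
--         run = 1
--         j = i + 1
--         while j < len(s) and s[j] == s[i]:
--             run += 1
--             j += 1
--         if run > best:
--             best = run
--     return best
-- ===== Notes on version B (the rewrite author's own statement) =====
-- stated objective: alternative
-- what changed: Replaces A's single running-counter scan (comparing s[i] with s[i-1]) by a brute-force search over all starting positions with an inner loop counting the run of equal characters from each start.
import Mathlib
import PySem

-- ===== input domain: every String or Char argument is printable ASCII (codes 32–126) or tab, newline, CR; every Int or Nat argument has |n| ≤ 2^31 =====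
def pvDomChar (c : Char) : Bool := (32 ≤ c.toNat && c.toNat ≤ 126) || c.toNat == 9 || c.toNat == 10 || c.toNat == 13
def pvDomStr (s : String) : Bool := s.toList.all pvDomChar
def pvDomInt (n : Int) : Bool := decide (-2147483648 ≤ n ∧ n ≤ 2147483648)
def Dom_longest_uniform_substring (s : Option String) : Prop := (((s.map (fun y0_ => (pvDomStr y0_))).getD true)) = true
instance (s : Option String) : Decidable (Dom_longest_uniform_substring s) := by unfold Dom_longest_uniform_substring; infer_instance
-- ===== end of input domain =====

-- B: brute-force search over all starting positions (inner run counter, O(n^2)) instead of A's single running-counter scan.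
-- ===== PORT A =====
-- the for-loop of A: walks the remaining chars, comparing each to the previous one
def pvAGo : List Char → Char → Int → Int → Int
  | [], _, maxL, cur => max maxL cur
  | c :: rest, prev, maxL, cur =>
    if c = prev then pvAGo rest c maxL (cur + 1)
    else pvAGo rest c (max maxL cur) 1

def longest_uniform_substring (s : Option String) : Int :=
  match s with
  | none => 0
  | some str =>
    match str.toList with
    | [] => 0
    | c :: rest => pvAGo rest c 1 1

-- ===== PORT B =====
-- the inner while loop of B: counts how many further chars equal s[i]
def pvCountRun (c : Char) : List Char → Int
  | [] => 0
  | d :: rest => if d = c then 1 + pvCountRun c rest else 0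

-- the outer for-loop of B over starting positions (each suffix = one start), carrying best
def pvBestGo : List Char → Int → Int
  | [], best => best
  | c :: rest, best =>
    let run := 1 + pvCountRun c rest
    pvBestGo rest (if run > best then run else best)

def longest_uniform_substring_alt (s : Option String) : Int :=
  match s with
  | none => 0
  | some str =>
    match str.toList with
    | [] => 0
    | c :: rest => pvBestGo (c :: rest) 0

-- ===== PRECONDITION & SPEC =====
def Spec_longest_uniform_substring (s : Option String) (out : Int) : Prop := out = longest_uniform_substring_alt s
instance (s : Option String) (out : Int) : Decidable (Spec_longest_uniform_substring s out) := by unfold Spec_longest_uniform_substring; infer_instance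

-- ===== CLAIM (what is proved, stated in full; the proofs are below) =====
def Claim_equal_longest_uniform_substring : Prop := ∀ (s : Option String), Dom_longest_uniform_substring s → Spec_longest_uniform_substring s (longest_uniform_substring s)

-- ===== LEMMAS AND PROOFS =====

-- lengths of the maximal runs of equal consecutive characters (proof-side notion)
def pvRunLengths : List Char → List Int
  | [] => []
  | c :: rest =>
    (1 + (rest.takeWhile (· = c)).length : Int) :: pvRunLengths (rest.dropWhile (· = c))
  termination_by l => l.length
  decreasing_by
    simpa using Nat.lt_succ_of_le (List.length_dropWhile_le (· = c) rest)

-- M l: the maximum run length (0 for the empty list)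
def pvM (l : List Char) : Int := (pvRunLengths l).foldl max 0

theorem pvFoldlMaxMax (l : List Int) (a b : Int) :
    l.foldl max (max a b) = max a (l.foldl max b) := by
  induction l generalizing a b with
  | nil => rfl
  | cons x xs ih =>
    simp only [List.foldl]
    rw [max_assoc, ih]

theorem pvCountRun_eq (c : Char) (l : List Char) :
    pvCountRun c l = ((l.takeWhile (· = c)).length : Int) := by
  induction l with
  | nil => simp [pvCountRun]
  | cons d rest ih =>
    by_cases h : d = c
    · subst h
      simp [pvCountRun, ih]
      ring
    · simp [pvCountRun, h]

theorem pvM_cons (c : Char) (rest : List Char) :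
    pvM (c :: rest) = max (1 + ((rest.takeWhile (· = c)).length : Int)) (pvM rest) := by
  cases rest with
  | nil => simp [pvM, pvRunLengths]
  | cons d rest' =>
    by_cases h : d = c
    · subst h
      have e1 : pvRunLengths (d :: d :: rest')
          = (1 + (((rest'.takeWhile (· = d)).length : Int) + 1)) :: pvRunLengths (rest'.dropWhile (· = d)) := by
        simp only [pvRunLengths, List.takeWhile_cons, decide_true, if_true,
          List.dropWhile_cons, List.length_cons]
        push_cast; ring_nf
      have e2 : pvRunLengths (d :: rest')
          = (1 + ((rest'.takeWhile (· = d)).length : Int)) :: pvRunLengths (rest'.dropWhile (· = d)) := by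
        simp [pvRunLengths]
      have hn : (0 : Int) ≤ ((rest'.takeWhile (· = d)).length : Int) := Int.natCast_nonneg _
      rw [pvM, pvM, e1, e2, List.foldl, List.foldl,
        show max (0 : Int) (1 + (((rest'.takeWhile (· = d)).length : Int) + 1))
            = max (1 + (((rest'.takeWhile (· = d)).length : Int) + 1))
                (max 0 (1 + ((rest'.takeWhile (· = d)).length : Int))) from by omega,
        pvFoldlMaxMax]
      simp
    · have e1 : pvRunLengths (c :: d :: rest')
          = (1 + (0 : Int)) :: pvRunLengths (d :: rest') := by
        simp [pvRunLengths, h]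
      rw [pvM, e1, List.foldl,
        show max (0 : Int) (1 + 0) = max (1 + 0) 0 from by omega, pvFoldlMaxMax]
      norm_num [List.takeWhile_cons, h, pvM]

theorem pvM_nonneg (l : List Char) : 0 ≤ pvM l := by
  cases l with
  | nil => simp [pvM, pvRunLengths]
  | cons c rest =>
    rw [pvM_cons]
    have : ((rest.takeWhile (· = c)).length : Int) ≥ 0 := Int.natCast_nonneg _
    omega

theorem pvBestGo_eq (l : List Char) (b : Int) (hb : 0 ≤ b) :
    pvBestGo l b = max b (pvM l) := by
  induction l generalizing b with
  | nil => simp [pvBestGo, pvM, pvRunLengths]; omega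
  | cons c rest ih =>
    have ht : ((rest.takeWhile (· = c)).length : Int) ≥ 0 := Int.natCast_nonneg _
    have hM : 0 ≤ pvM rest := pvM_nonneg rest
    simp only [pvBestGo, pvCountRun_eq]
    rw [ih _ (by split <;> omega)]
    rw [pvM_cons]
    split <;> omega

-- A's loop computes the foldl of the continuation runs
def pvContRuns : List Char → Char → Int → List Int
  | [], _, cur => [cur]
  | c :: rest, prev, cur =>
    if c = prev then pvContRuns rest c (cur + 1)
    else cur :: pvContRuns rest c 1

theorem pvAGo_eq_foldl (l : List Char) (prev : Char) (maxL cur : Int) :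
    pvAGo l prev maxL cur = (pvContRuns l prev cur).foldl max maxL := by
  induction l generalizing prev maxL cur with
  | nil => simp [pvAGo, pvContRuns]
  | cons c rest ih =>
    simp only [pvAGo, pvContRuns]
    split_ifs <;> simp [ih, List.foldl]

theorem pvContRuns_eq (l : List Char) (prev : Char) (cur : Int) :
    pvContRuns l prev cur =
      (cur + (l.takeWhile (· = prev)).length : Int) :: pvRunLengths (l.dropWhile (· = prev)) := by
  induction l generalizing prev cur with
  | nil => simp [pvContRuns, pvRunLengths]
  | cons c rest ih =>
    by_cases h : c = prev
    · subst h
      simp only [pvContRuns, ih, List.takeWhile_cons, decide_true,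
        List.dropWhile_cons, if_true, List.length_cons]
      congr 1
      push_cast; ring
    · simp only [pvContRuns, List.takeWhile_cons, List.dropWhile_cons,
        decide_eq_true_eq, h, if_false, List.length_nil, pvRunLengths, ih]
      simp

-- A on a nonempty list computes the maximum run length
theorem pvAGo_eq_M (c : Char) (rest : List Char) :
    pvAGo rest c 1 1 = pvM (c :: rest) := by
  rw [pvAGo_eq_foldl, pvContRuns_eq]
  show List.foldl max 1 _ = pvM (c :: rest)
  have ht : ((rest.takeWhile (· = c)).length : Int) ≥ 0 := Int.natCast_nonneg _
  simp only [List.foldl, pvM, pvRunLengths]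
  have e1 : max (1 : Int) (1 + ((rest.takeWhile (· = c)).length : Int))
      = max (1 + ((rest.takeWhile (· = c)).length : Int)) 0 := by omega
  have e2 : max (0 : Int) (1 + ((rest.takeWhile (· = c)).length : Int))
      = max (1 + ((rest.takeWhile (· = c)).length : Int)) 0 := by omega
  rw [e1, e2]

-- ===== VERDICT (by name: the statement is the Claim_ definition above) =====
theorem longest_uniform_substring_spec : Claim_equal_longest_uniform_substring := by
  intro s _
  unfold Spec_longest_uniform_substring
  cases s with
  | none => rfl
  | some str =>
    simp only [longest_uniform_substring, longest_uniform_substring_alt]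
    cases h : str.toList with
    | nil => rfl
    | cons c rest =>
      show pvAGo rest c 1 1 = pvBestGo (c :: rest) 0
      rw [pvAGo_eq_M, pvBestGo_eq _ _ le_rfl]
      have := pvM_nonneg (c :: rest)
      omega
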